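-- pv_equiv track=rewrite | github.com/muhammadzaini213/Emoji-Deleter | antiemoji.py | remove_top_level_triple_quotes_python
-- ===== SOURCE A (Python) =====
-- def remove_top_level_triple_quotes_python(text):
--     lines = text.replace("\r\n", "\n").replace("\r", "\n").split("\n")
--     result = []
--     inside = False
--
--     for line in lines:
--         stripped = line.lstrip()
--         indent = len(line) - len(stripped)
--
--         if indent == 0 and (
--             stripped.startswith("'''") or stripped.startswith('"""')
--         ):
--             inside = not inside
--             continue
--
--         if not inside:
--             result.append(line)
--
--     return "\n".join(result)
-- ===== SOURCE B (Python) =====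
-- def remove_top_level_triple_quotes_python(text):
--     lines = text.replace("\r\n", "\n").replace("\r", "\n").split("\n")
--
--     def is_delim(line):
--         stripped = line.lstrip()
--         return len(stripped) == len(line) and (
--             stripped.startswith("'''") or stripped.startswith('"""')
--         )
--
--     flags = [is_delim(line) for line in lines]
--     prefix = [0]
--     for f in flags:
--         prefix.append(prefix[-1] + (1 if f else 0))
--
--     kept = [line for line, f, c in zip(lines, flags, prefix) if not f and c % 2 == 0]
--     return "\n".join(kept)
-- ===== Notes on version B (the rewrite author's own statement) =====
-- stated objective: alternative
-- what changed: Replaced A's single-pass fold with a mutable inside-toggle by a two-pass table decomposition: mark delimiter lines, build a prefix-count list, then keep the non-delimiter lines whose count of preceding delimiters is even.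
import Mathlib
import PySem

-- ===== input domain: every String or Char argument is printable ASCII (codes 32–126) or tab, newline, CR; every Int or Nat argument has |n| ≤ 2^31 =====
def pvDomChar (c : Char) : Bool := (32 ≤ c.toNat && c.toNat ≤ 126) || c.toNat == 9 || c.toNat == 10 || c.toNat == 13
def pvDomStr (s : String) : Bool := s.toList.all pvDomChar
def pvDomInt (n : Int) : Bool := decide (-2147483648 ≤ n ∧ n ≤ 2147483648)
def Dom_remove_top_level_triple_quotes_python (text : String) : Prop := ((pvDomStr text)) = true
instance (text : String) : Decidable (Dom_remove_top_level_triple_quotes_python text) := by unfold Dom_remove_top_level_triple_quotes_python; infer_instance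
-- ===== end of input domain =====

-- B replaces A's single-pass mutable `inside` toggle with a delimiter-flag table,
-- a prefix-count list and a parity filter (objective: alternative decomposition, same cost).

-- ===== PORT A =====
-- `split(sep)` with the literal sep "\n" ≠ "": split? is always `some`; `.getD []` only totalizes.
def remove_top_level_triple_quotes_python (text : String) : String :=
  let lines := (PySem.Str.split?
    (PySem.Str.replace (PySem.Str.replace text "\r\n" "\n") "\r" "\n") "\n").getD []
  let st := lines.foldl (fun (st : List String × Bool) line =>
    let stripped := PySem.Str.lstrip line
    let indent : Int := PySem.Str.len line - PySem.Str.len stripped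
    if indent == 0 &&
        (PySem.Str.startswith stripped "'''" || PySem.Str.startswith stripped "\"\"\"") then
      (st.1, !st.2)
    else if !st.2 then (st.1 ++ [line], st.2) else st) ([], false)
  PySem.Str.join "\n" st.1

-- ===== PORT B =====
def pvIsDelim (line : String) : Bool :=
  let stripped := PySem.Str.lstrip line
  PySem.Str.len stripped == PySem.Str.len line &&
    (PySem.Str.startswith stripped "'''" || PySem.Str.startswith stripped "\"\"\"")

def remove_top_level_triple_quotes_python_alt (text : String) : String :=
  let lines := (PySem.Str.split?
    (PySem.Str.replace (PySem.Str.replace text "\r\n" "\n") "\r" "\n") "\n").getD []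
  let flags := lines.map pvIsDelim
  let prefixCounts := flags.foldl
    (fun acc f => acc ++ [acc.getLast! + (if f then 1 else 0)]) [0]
  let kept := ((lines.zip (flags.zip prefixCounts)).filter
      (fun p => !p.2.1 && p.2.2 % 2 == 0)).map (·.1)
  PySem.Str.join "\n" kept

-- ===== PRECONDITION & SPEC =====
def Spec_remove_top_level_triple_quotes_python (text : String) (out : String) : Prop := out = remove_top_level_triple_quotes_python_alt text
instance (text : String) (out : String) : Decidable (Spec_remove_top_level_triple_quotes_python text out) := by unfold Spec_remove_top_level_triple_quotes_python; infer_instance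

-- ===== CLAIM (what is proved, stated in full; the proofs are below) =====
def Claim_equal_remove_top_level_triple_quotes_python : Prop := ∀ (text : String), Dom_remove_top_level_triple_quotes_python text → Spec_remove_top_level_triple_quotes_python text (remove_top_level_triple_quotes_python text)

-- ===== LEMMAS AND PROOFS =====

/-- Reference spec: lines kept from here on, given `c` delimiter lines seen so far. -/
def pvKeep : List String → Nat → List String
  | [], _ => []
  | l :: ls, c =>
    if pvIsDelim l then pvKeep ls (c + 1)
    else (if c % 2 == 0 then [l] else []) ++ pvKeep ls c

/-- Prefix counts emitted after start value `c`. -/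
def pvCounts : List Bool → Nat → List Nat
  | [], _ => []
  | f :: fs, c =>
    let c' := c + (if f then 1 else 0)
    c' :: pvCounts fs c'

/-- A's loop body with the delimiter test named. -/
def pvStepA (st : List String × Bool) (line : String) : List String × Bool :=
  if pvIsDelim line then (st.1, !st.2)
  else if !st.2 then (st.1 ++ [line], st.2) else st

theorem pvCondA (line : String) :
    ((PySem.Str.len line - PySem.Str.len (PySem.Str.lstrip line) == 0) &&
      (PySem.Str.startswith (PySem.Str.lstrip line) "'''" ||
        PySem.Str.startswith (PySem.Str.lstrip line) "\"\"\"")) = pvIsDelim line := by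
  unfold pvIsDelim
  congr 1
  rw [Bool.eq_iff_iff]
  simp only [beq_iff_eq, Int.sub_eq_zero]
  omega

theorem pvStepA_eq :
    (fun (st : List String × Bool) line =>
      let stripped := PySem.Str.lstrip line
      let indent : Int := PySem.Str.len line - PySem.Str.len stripped
      if indent == 0 &&
          (PySem.Str.startswith stripped "'''" || PySem.Str.startswith stripped "\"\"\"") then
        (st.1, !st.2)
      else if !st.2 then (st.1 ++ [line], st.2) else st) = pvStepA := by
  funext st line
  simp only [pvStepA, pvCondA]

theorem pvGetLast!_concat (xs : List Nat) (c : Nat) : (xs ++ [c]).getLast! = c := by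
  simp [List.getLast?_concat]

theorem pvPrefixFold (flags : List Bool) (xs : List Nat) (c : Nat) :
    flags.foldl (fun acc f => acc ++ [acc.getLast! + (if f then 1 else 0)]) (xs ++ [c])
      = xs ++ [c] ++ pvCounts flags c := by
  induction flags generalizing xs c with
  | nil => simp [pvCounts]
  | cons f fs ih =>
    simp only [List.foldl_cons, pvGetLast!_concat, pvCounts]
    have := ih (xs ++ [c]) (c + (if f then 1 else 0))
    simpa using this

theorem pvZipFilter (lines : List String) (c : Nat) :
    (((lines.zip ((lines.map pvIsDelim).zip (c :: pvCounts (lines.map pvIsDelim) c))).filter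
        (fun p => !p.2.1 && p.2.2 % 2 == 0)).map (·.1)) = pvKeep lines c := by
  induction lines generalizing c with
  | nil => rfl
  | cons l ls ih =>
    by_cases hd : pvIsDelim l
    · simp [pvCounts, pvKeep, hd, ih]
    · by_cases hc : c % 2 == 0 <;>
        simp [pvCounts, pvKeep, hd, hc, ih]

theorem pvFoldA (lines : List String) (acc : List String) (c : Nat) :
    (lines.foldl pvStepA (acc, decide (c % 2 = 1))).1 = acc ++ pvKeep lines c := by
  induction lines generalizing acc c with
  | nil => simp [pvKeep]
  | cons l ls ih =>
    rw [List.foldl_cons]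
    by_cases hd : pvIsDelim l
    · have hb : (!decide (c % 2 = 1)) = decide ((c + 1) % 2 = 1) := by
        rcases Nat.mod_two_eq_zero_or_one c with h | h <;> simp [Nat.add_mod, h]
      rw [show pvStepA (acc, decide (c % 2 = 1)) l = (acc, decide ((c + 1) % 2 = 1)) from by
        simp [pvStepA, hd, hb]]
      rw [ih]
      simp [pvKeep, hd]
    · by_cases hc : c % 2 = 0
      · rw [show pvStepA (acc, decide (c % 2 = 1)) l = (acc ++ [l], decide (c % 2 = 1)) from by
          simp [pvStepA, hd, hc]]
        rw [ih]
        simp [pvKeep, hd, hc]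
      · have h1 : c % 2 = 1 := (Nat.mod_two_eq_zero_or_one c).resolve_left hc
        rw [show pvStepA (acc, decide (c % 2 = 1)) l = (acc, decide (c % 2 = 1)) from by
          simp [pvStepA, hd, h1]]
        rw [ih]
        simp [pvKeep, hd, h1]

theorem pvMain (L : List String) :
    (L.foldl pvStepA ([], false)).1 =
      ((L.zip ((L.map pvIsDelim).zip ((L.map pvIsDelim).foldl
          (fun acc f => acc ++ [acc.getLast! + (if f then 1 else 0)]) [0]))).filter
        (fun p => !p.2.1 && p.2.2 % 2 == 0)).map (·.1) := by
  have hA := pvFoldA L [] 0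
  simp only [Nat.zero_mod, List.nil_append] at hA
  norm_num at hA
  have hP := pvPrefixFold (L.map pvIsDelim) [] 0
  simp only [List.nil_append, List.singleton_append] at hP
  rw [hA, hP, pvZipFilter]

-- ===== VERDICT (by name: the statement is the Claim_ definition above) =====
theorem remove_top_level_triple_quotes_python_spec : Claim_equal_remove_top_level_triple_quotes_python := by
  intro text _
  unfold Spec_remove_top_level_triple_quotes_python
  unfold remove_top_level_triple_quotes_python remove_top_level_triple_quotes_python_alt
  simp only [pvStepA_eq]
  exact congrArg (PySem.Str.join "\n") (pvMain _)
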